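-- pv_equiv track=rewrite | github.com/Arjun3125/Era | persona/learning/episodic_memory.py | _is_conflicting
-- ===== SOURCE A (Python) =====
-- def _is_conflicting(past_decision, new_decision):
--     # naive rule: detect opposite verbs
--     negative_keywords = ["reduce", "cut", "stop", "avoid"]
--     positive_keywords = ["increase", "expand", "invest", "accelerate"]
--
--     for neg in negative_keywords:
--         for pos in positive_keywords:
--             if neg in past_decision.lower() and pos in new_decision.lower():
--                 return True
--             if pos in past_decision.lower() and neg in new_decision.lower():
--                 return True
--
--     return False
-- ===== SOURCE B (Python) =====
-- def _is_conflicting(past_decision, new_decision):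
--     # factored form: four membership flags instead of the nested neg x pos loop
--     negative_keywords = ["reduce", "cut", "stop", "avoid"]
--     positive_keywords = ["increase", "expand", "invest", "accelerate"]
--
--     past = past_decision.lower()
--     new = new_decision.lower()
--     past_has_neg = any(n in past for n in negative_keywords)
--     past_has_pos = any(p in past for p in positive_keywords)
--     new_has_neg = any(n in new for n in negative_keywords)
--     new_has_pos = any(p in new for p in positive_keywords)
--     return (past_has_neg and new_has_pos) or (past_has_pos and new_has_neg)
-- ===== Notes on version B (the rewrite author's own statement) =====
-- stated objective: simpler
-- what changed: Replaces the nested neg x pos cross-product loop by four independent keyword scans (past/new has negative/positive) combined with one factored boolean expression, and lowercases each string once instead of on every pair check.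
import Mathlib
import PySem

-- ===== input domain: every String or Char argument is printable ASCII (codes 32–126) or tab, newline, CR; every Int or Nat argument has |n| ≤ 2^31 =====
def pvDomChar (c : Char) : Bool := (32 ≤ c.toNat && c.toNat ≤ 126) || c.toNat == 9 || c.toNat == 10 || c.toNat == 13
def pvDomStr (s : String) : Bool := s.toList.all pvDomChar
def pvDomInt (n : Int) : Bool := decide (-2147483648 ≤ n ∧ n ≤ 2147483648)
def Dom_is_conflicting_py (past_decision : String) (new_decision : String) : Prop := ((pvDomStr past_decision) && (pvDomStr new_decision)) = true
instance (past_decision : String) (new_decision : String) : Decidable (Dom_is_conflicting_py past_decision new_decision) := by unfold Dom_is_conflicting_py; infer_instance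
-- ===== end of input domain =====

-- B replaces A's nested neg×pos cross-product loop by four independent keyword
-- scans combined in one factored boolean expression (objective: simpler).

-- ===== PORT A =====
def pvNegKwA : List String := ["reduce", "cut", "stop", "avoid"]
def pvPosKwA : List String := ["increase", "expand", "invest", "accelerate"]

-- nested for-loops with early 'return True' = nested List.any over the pair condition
def is_conflicting_py (past_decision : String) (new_decision : String) : Bool :=
  pvNegKwA.any (fun neg => pvPosKwA.any (fun pos =>
    (PySem.Str.isIn neg (PySem.Str.lower past_decision) &&
       PySem.Str.isIn pos (PySem.Str.lower new_decision)) ||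
    (PySem.Str.isIn pos (PySem.Str.lower past_decision) &&
       PySem.Str.isIn neg (PySem.Str.lower new_decision))))

-- ===== PORT B =====
def pvNegKwB : List String := ["reduce", "cut", "stop", "avoid"]
def pvPosKwB : List String := ["increase", "expand", "invest", "accelerate"]

def is_conflicting_py_alt (past_decision : String) (new_decision : String) : Bool :=
  let past := PySem.Str.lower past_decision
  let new := PySem.Str.lower new_decision
  let past_has_neg := pvNegKwB.any (fun n => PySem.Str.isIn n past)
  let past_has_pos := pvPosKwB.any (fun p => PySem.Str.isIn p past)
  let new_has_neg  := pvNegKwB.any (fun n => PySem.Str.isIn n new)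
  let new_has_pos  := pvPosKwB.any (fun p => PySem.Str.isIn p new)
  (past_has_neg && new_has_pos) || (past_has_pos && new_has_neg)

-- ===== PRECONDITION & SPEC =====
def Spec_is_conflicting_py (past_decision : String) (new_decision : String) (out : Bool) : Prop := out = is_conflicting_py_alt past_decision new_decision
instance (past_decision : String) (new_decision : String) (out : Bool) : Decidable (Spec_is_conflicting_py past_decision new_decision out) := by unfold Spec_is_conflicting_py; infer_instance

-- ===== CLAIM (what is proved, stated in full; the proofs are below) =====
def Claim_equal_is_conflicting_py : Prop := ∀ (past_decision : String) (new_decision : String), Dom_is_conflicting_py past_decision new_decision → Spec_is_conflicting_py past_decision new_decision (is_conflicting_py past_decision new_decision)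

-- ===== LEMMAS AND PROOFS =====

-- the one real fact: a cross-product 'any' of (p a && q b) || (r b && s a) factors
theorem pv_any_cross {α β : Type} (l1 : List α) (l2 : List β)
    (p s : α → Bool) (q r : β → Bool) :
    (l1.any fun a => l2.any fun b => (p a && q b) || (r b && s a))
      = ((l1.any p && l2.any q) || (l2.any r && l1.any s)) := by
  rw [Bool.eq_iff_iff]
  simp only [List.any_eq_true, Bool.or_eq_true, Bool.and_eq_true]
  aesop

-- ===== VERDICT (by name: the statement is the Claim_ definition above) =====
theorem is_conflicting_py_spec : Claim_equal_is_conflicting_py := by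
  intro past_decision new_decision _
  show is_conflicting_py past_decision new_decision
      = is_conflicting_py_alt past_decision new_decision
  rw [is_conflicting_py, is_conflicting_py_alt]
  exact pv_any_cross pvNegKwA pvPosKwA _ _ _ _
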